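-- pv_equiv track=rewrite | github.com/AIM3r4j/BRACU | CSE423-BRACU-Computer Graphics/Labs/Lab3/lab3.py | get_other_points
-- ===== SOURCE A (Python) =====
-- def get_other_points(slice_points, center_x, center_y):
--     circle_points_array = []
--     zone0_array = []
--     zone1_array = []
--     zone2_array = []
--     zone3_array = []
--     zone4_array = []
--     zone5_array = []
--     zone6_array = []
--     zone7_array = []
--
--     for s in range(len(slice_points)):
--         x, y = slice_points[s][0], slice_points[s][1]
--         zone0_array.append((y+ center_x, x+ center_y))
--         zone1_array.append((x+ center_x, y+ center_y))
--         zone2_array.append((-x+ center_x, y+ center_y))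
--         zone3_array.append((-y+ center_x, x+ center_y))
--         zone4_array.append((-y+ center_x, -x+ center_y))
--         zone5_array.append((-x+ center_x, -y+ center_y))
--         zone6_array.append((x+ center_x, -y+ center_y))
--         zone7_array.append((y+ center_x, -x+ center_y))
--
--     circle_points_array.append(zone0_array)
--     circle_points_array.append(zone1_array)
--     circle_points_array.append(zone2_array)
--     circle_points_array.append(zone3_array)
--     circle_points_array.append(zone4_array)
--     circle_points_array.append(zone5_array)
--     circle_points_array.append(zone6_array)
--     circle_points_array.append(zone7_array)
--
--     return circle_points_array
-- ===== SOURCE B (Python) =====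
-- # B derives only the two base octant lists from the input, then builds the
-- # other six zones by reflecting ALREADY-COMPUTED zone lists about the center
-- # axes (x = center_x, y = center_y), composing reflections instead of applying
-- # eight independent transforms to the raw points.
--
-- def get_other_points(slice_points, center_x, center_y):
--     def mirror_x(pts):  # reflect about the vertical line x = center_x
--         return [(2 * center_x - X, Y) for (X, Y) in pts]
--
--     def mirror_y(pts):  # reflect about the horizontal line y = center_y
--         return [(X, 2 * center_y - Y) for (X, Y) in pts]
--
--     zone1 = [(x + center_x, y + center_y) for (x, y) in slice_points]
--     zone0 = [(y + center_x, x + center_y) for (x, y) in slice_points]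
--     zone2 = mirror_x(zone1)
--     zone3 = mirror_x(zone0)
--     zone6 = mirror_y(zone1)
--     zone7 = mirror_y(zone0)
--     zone4 = mirror_x(zone7)
--     zone5 = mirror_x(zone6)
--     return [zone0, zone1, zone2, zone3, zone4, zone5, zone6, zone7]
-- ===== Notes on version B (the rewrite author's own statement) =====
-- stated objective: alternative
-- what changed: Instead of applying eight independent sign/swap transforms to every raw point, B computes only the two base octant lists and derives the other six zone lists by composing reflections (about x=center_x and y=center_y) of already-computed zone lists.
import Mathlib
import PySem

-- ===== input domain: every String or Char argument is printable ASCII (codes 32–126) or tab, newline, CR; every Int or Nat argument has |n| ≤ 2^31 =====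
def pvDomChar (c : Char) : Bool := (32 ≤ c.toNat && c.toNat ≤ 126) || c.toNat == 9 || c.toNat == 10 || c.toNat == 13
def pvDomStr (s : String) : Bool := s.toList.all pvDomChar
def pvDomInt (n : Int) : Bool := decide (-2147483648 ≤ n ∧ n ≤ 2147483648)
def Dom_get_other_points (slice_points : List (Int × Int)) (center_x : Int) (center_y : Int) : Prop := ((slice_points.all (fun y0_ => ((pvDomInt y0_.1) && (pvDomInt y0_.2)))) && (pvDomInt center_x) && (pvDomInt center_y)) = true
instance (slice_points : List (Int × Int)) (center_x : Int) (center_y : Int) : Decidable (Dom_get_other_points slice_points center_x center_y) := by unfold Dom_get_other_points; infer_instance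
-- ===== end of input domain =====

-- B computes only the two base octant lists and derives the other six zones by reflecting already-computed zone lists about the center axes; same values, alternative decomposition.

-- ===== PORT A =====
-- state = the eight zone arrays; the loop over range(len(slice_points)) appends one point to each
def get_other_points (slice_points : List (Int × Int)) (center_x : Int) (center_y : Int) : List (List (Int × Int)) :=
  let st := (PySem.List.pyRange 0 slice_points.length 1).foldl
    (fun (z : List (Int × Int) × List (Int × Int) × List (Int × Int) × List (Int × Int) ×
              List (Int × Int) × List (Int × Int) × List (Int × Int) × List (Int × Int)) s =>
      let p := PySem.List.pyGetD slice_points s (0, 0)   -- index always in range, default never used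
      let x := p.1; let y := p.2
      (z.1 ++ [(y + center_x, x + center_y)],
       z.2.1 ++ [(x + center_x, y + center_y)],
       z.2.2.1 ++ [(-x + center_x, y + center_y)],
       z.2.2.2.1 ++ [(-y + center_x, x + center_y)],
       z.2.2.2.2.1 ++ [(-y + center_x, -x + center_y)],
       z.2.2.2.2.2.1 ++ [(-x + center_x, -y + center_y)],
       z.2.2.2.2.2.2.1 ++ [(x + center_x, -y + center_y)],
       z.2.2.2.2.2.2.2 ++ [(y + center_x, -x + center_y)]))
    ([], [], [], [], [], [], [], [])
  [st.1, st.2.1, st.2.2.1, st.2.2.2.1, st.2.2.2.2.1, st.2.2.2.2.2.1, st.2.2.2.2.2.2.1, st.2.2.2.2.2.2.2]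

-- ===== PORT B =====
-- reflect a computed point list about the vertical line x = center_x
def pvMirrorX (center_x : Int) (pts : List (Int × Int)) : List (Int × Int) :=
  pts.map (fun p => (2 * center_x - p.1, p.2))

-- reflect a computed point list about the horizontal line y = center_y
def pvMirrorY (center_y : Int) (pts : List (Int × Int)) : List (Int × Int) :=
  pts.map (fun p => (p.1, 2 * center_y - p.2))

def get_other_points_alt (slice_points : List (Int × Int)) (center_x : Int) (center_y : Int) : List (List (Int × Int)) :=
  let zone1 := slice_points.map (fun p => (p.1 + center_x, p.2 + center_y))
  let zone0 := slice_points.map (fun p => (p.2 + center_x, p.1 + center_y))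
  let zone2 := pvMirrorX center_x zone1
  let zone3 := pvMirrorX center_x zone0
  let zone6 := pvMirrorY center_y zone1
  let zone7 := pvMirrorY center_y zone0
  let zone4 := pvMirrorX center_x zone7
  let zone5 := pvMirrorX center_x zone6
  [zone0, zone1, zone2, zone3, zone4, zone5, zone6, zone7]

-- ===== PRECONDITION & SPEC =====
def Spec_get_other_points (slice_points : List (Int × Int)) (center_x : Int) (center_y : Int) (out : List (List (Int × Int))) : Prop := out = get_other_points_alt slice_points center_x center_y
instance (slice_points : List (Int × Int)) (center_x : Int) (center_y : Int) (out : List (List (Int × Int))) : Decidable (Spec_get_other_points slice_points center_x center_y out) := by unfold Spec_get_other_points; infer_instance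

-- ===== CLAIM (what is proved, stated in full; the proofs are below) =====
def Claim_equal_get_other_points : Prop := ∀ (slice_points : List (Int × Int)) (center_x : Int) (center_y : Int), Dom_get_other_points slice_points center_x center_y → Spec_get_other_points slice_points center_x center_y (get_other_points slice_points center_x center_y)

-- ===== LEMMAS AND PROOFS =====

-- loop invariant for A's fold over the points: each zone accumulator extends by that zone's map
theorem pv_foldA (cx cy : Int) (sp : List (Int × Int))
    (acc : List (Int × Int) × List (Int × Int) × List (Int × Int) × List (Int × Int) ×
           List (Int × Int) × List (Int × Int) × List (Int × Int) × List (Int × Int)) :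
    sp.foldl
      (fun z p =>
        let x := p.1; let y := p.2
        (z.1 ++ [(y + cx, x + cy)],
         z.2.1 ++ [(x + cx, y + cy)],
         z.2.2.1 ++ [(-x + cx, y + cy)],
         z.2.2.2.1 ++ [(-y + cx, x + cy)],
         z.2.2.2.2.1 ++ [(-y + cx, -x + cy)],
         z.2.2.2.2.2.1 ++ [(-x + cx, -y + cy)],
         z.2.2.2.2.2.2.1 ++ [(x + cx, -y + cy)],
         z.2.2.2.2.2.2.2 ++ [(y + cx, -x + cy)])) acc =
    (acc.1 ++ sp.map (fun p => (p.2 + cx, p.1 + cy)),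
     acc.2.1 ++ sp.map (fun p => (p.1 + cx, p.2 + cy)),
     acc.2.2.1 ++ sp.map (fun p => (-p.1 + cx, p.2 + cy)),
     acc.2.2.2.1 ++ sp.map (fun p => (-p.2 + cx, p.1 + cy)),
     acc.2.2.2.2.1 ++ sp.map (fun p => (-p.2 + cx, -p.1 + cy)),
     acc.2.2.2.2.2.1 ++ sp.map (fun p => (-p.1 + cx, -p.2 + cy)),
     acc.2.2.2.2.2.2.1 ++ sp.map (fun p => (p.1 + cx, -p.2 + cy)),
     acc.2.2.2.2.2.2.2 ++ sp.map (fun p => (p.2 + cx, -p.1 + cy))) := by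
  induction sp generalizing acc with
  | nil => simp
  | cons hd tl ih => simp [List.foldl_cons, ih]

-- ===== VERDICT (by name: the statement is the Claim_ definition above) =====
theorem get_other_points_spec : Claim_equal_get_other_points := by
  intro sp cx cy _
  show _ = _
  rw [get_other_points]
  rw [PySem.List.foldl_pyRange_zero_pyGetD' sp (0, 0)
    (fun z p =>
      let x := p.1; let y := p.2
      (z.1 ++ [(y + cx, x + cy)],
       z.2.1 ++ [(x + cx, y + cy)],
       z.2.2.1 ++ [(-x + cx, y + cy)],
       z.2.2.2.1 ++ [(-y + cx, x + cy)],
       z.2.2.2.2.1 ++ [(-y + cx, -x + cy)],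
       z.2.2.2.2.2.1 ++ [(-x + cx, -y + cy)],
       z.2.2.2.2.2.2.1 ++ [(x + cx, -y + cy)],
       z.2.2.2.2.2.2.2 ++ [(y + cx, -x + cy)]))
    ([], [], [], [], [], [], [], [])]
  rw [pv_foldA]
  simp only [List.nil_append, get_other_points_alt, pvMirrorX, pvMirrorY, List.map_map]
  simp only [List.cons.injEq, and_true]
  and_intros <;> first
    | trivial
    | (apply List.map_congr_left; intro p _
       simp only [Function.comp_apply, Prod.mk.injEq, and_true, true_and]
       omega)
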